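-- pv_equiv track=rewrite | github.com/WOOF999/BioComputing | assignment6/Assignment6.py | star_align
-- ===== SOURCE A (Python) =====
-- def star_align(msl,psa_seq_c,psa_seq):
--     center_seq=msl[0]
--     num=len(center_seq)
--     i=0
--     while num!=0:
--         if psa_seq_c[i]!='-' and center_seq[i]=='-' :
--             psa_seq=insert_gap(psa_seq,i)
--             psa_seq_c=insert_gap(psa_seq_c,i)
--             i+=1
--             num-=1
--         elif psa_seq_c[i]=='-' and center_seq[i]!='-':
--             num+=1
--             center_seq=insert_gap(center_seq,i)
--             for j in range(1,len(msl)):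
--                 msl[j]=insert_gap(msl[j],i)
--         else:
--             num-=1
--             i+=1
--     msl[0]=center_seq
--     msl.append(psa_seq)
--     return msl
--
-- def insert_gap(sequence, index):
--     return sequence[:index] + '-' + sequence[index:]
-- ===== SOURCE B (Python) =====
-- # Alternative algorithm: a single two-pointer merge of the two gap patterns,
-- # collecting gap positions and building each output string in one pass, instead
-- # of A's repeated insert_gap string rebuilding.  Return-value equivalence only:
-- # A mutates msl in place, B builds a fresh list.
-- def star_align(msl, psa_seq_c, psa_seq):
--     c = msl[0]
--     a = 0
--     b = 0
--     merged = []     # characters of the merged center sequence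
--     gaps_rows = []  # merged positions where msl[1:] gain a gap
--     gaps_psa = []   # merged positions where psa_seq gains a gap
--     while a < len(c):
--         m = len(merged)
--         if psa_seq_c[b] != '-' and c[a] == '-':
--             merged.append('-')
--             gaps_psa.append(m)
--             a += 1
--         elif psa_seq_c[b] == '-' and c[a] != '-':
--             merged.append('-')
--             gaps_rows.append(m)
--             b += 1
--         else:
--             merged.append(c[a])
--             a += 1
--             b += 1
--     out = [''.join(merged)]
--     for row in msl[1:]:
--         out.append(_with_gaps(row, gaps_rows, len(merged)))
--     out.append(_with_gaps(psa_seq, gaps_psa, len(merged)))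
--     return out
--
-- def _with_gaps(s, gaps, total):
--     res = []
--     r = 0
--     g = 0
--     for m in range(total):
--         if g < len(gaps) and gaps[g] == m:
--             res.append('-')
--             g += 1
--         elif r < len(s):
--             res.append(s[r])
--             r += 1
--     return ''.join(res) + s[r:]
-- ===== Notes on version B (the rewrite author's own statement) =====
-- stated objective: alternative
-- what changed: A repeatedly re-builds the growing strings with insert_gap (one O(n) slice per inserted gap, applied to the center, every msl row and both psa strings); B walks the center and psa_seq_c once with two pointers to compute the merged gap pattern plus two lists of gap positions, then builds each output string in a single pass with join.
import Mathlib
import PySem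

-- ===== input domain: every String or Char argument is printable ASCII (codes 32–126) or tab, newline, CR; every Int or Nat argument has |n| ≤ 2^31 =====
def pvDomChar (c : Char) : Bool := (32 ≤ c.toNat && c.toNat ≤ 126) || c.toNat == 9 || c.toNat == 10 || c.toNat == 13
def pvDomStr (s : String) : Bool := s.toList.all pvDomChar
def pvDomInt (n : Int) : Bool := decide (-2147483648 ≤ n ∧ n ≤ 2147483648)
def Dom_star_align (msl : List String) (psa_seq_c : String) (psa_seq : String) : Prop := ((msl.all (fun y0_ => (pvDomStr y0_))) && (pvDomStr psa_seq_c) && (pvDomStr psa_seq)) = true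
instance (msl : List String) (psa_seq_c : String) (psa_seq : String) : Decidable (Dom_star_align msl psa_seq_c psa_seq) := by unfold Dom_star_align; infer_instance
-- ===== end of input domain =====

-- B replaces A's repeated insert_gap string rebuilding by a single two-pointer merge of
-- the two gap patterns plus one gap-applying pass per row (objective: alternative).
-- Equivalence is about the RETURN value only: A mutates msl in place, B builds a new list.

-- ===== PORT A =====

-- insert_gap(sequence, index) = sequence[:index] + '-' + sequence[index:]
-- exact for the nonnegative indices A uses (slices clamp, as take/drop do)
def insertGap (sequence : List Char) (index : Nat) : List Char :=
  sequence.take index ++ '-' :: sequence.drop index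

-- the while-loop of A; fuel only makes the recursion total (Python's loop terminates
-- whenever it does not raise; outside Pre_ the bail-out values are irrelevant)
def starLoopA (fuel : Nat) (center pc p : List Char) (rest : List (List Char))
    (i num : Nat) : List (List Char) :=
  match fuel with
  | 0 => (center :: rest) ++ [p]          -- fuel exhausted (never reached under Pre_)
  | fuel' + 1 =>
    if num ≠ 0 then
      match pc[i]?, center[i]? with
      | some pch, some cch =>
        if pch ≠ '-' ∧ cch = '-' then
          starLoopA fuel' center (insertGap pc i) (insertGap p i) rest (i + 1) (num - 1)
        else if pch = '-' ∧ cch ≠ '-' then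
          starLoopA fuel' (insertGap center i) pc p (rest.map (fun r => insertGap r i)) i (num + 1)
        else
          starLoopA fuel' center pc p rest (i + 1) (num - 1)
      | _, _ => (center :: rest) ++ [p]   -- Python raises IndexError here; excluded by Pre_
    else (center :: rest) ++ [p]

def star_align (msl : List String) (psa_seq_c : String) (psa_seq : String) : List String :=
  match msl with
  | [] => []                              -- Python raises IndexError (msl[0]); excluded by Pre_
  | m0 :: rest =>
    (starLoopA (2 * (m0.toList.length + psa_seq_c.toList.length) + 1)
        m0.toList psa_seq_c.toList psa_seq.toList (rest.map String.toList)
        0 m0.toList.length).map (fun l => String.mk l)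

-- ===== PORT B =====

-- the two-pointer while-loop of B, as recursion on the two remaining suffixes;
-- returns (merged center, gap positions for msl[1:], gap positions for psa_seq)
def bWalk (cs ps : List Char) (m : Nat) : List Char × List Nat × List Nat :=
  match cs, ps with
  | [], _ => ([], [], [])
  | _ :: _, [] => ([], [], [])            -- Python raises IndexError here; excluded by Pre_
  | c :: cs', pch :: ps' =>
    if pch ≠ '-' ∧ c = '-' then
      let t := bWalk cs' (pch :: ps') (m + 1)
      ('-' :: t.1, t.2.1, m :: t.2.2)
    else if pch = '-' ∧ c ≠ '-' then
      let t := bWalk (c :: cs') ps' (m + 1)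
      ('-' :: t.1, m :: t.2.1, t.2.2)
    else
      let t := bWalk cs' ps' (m + 1)
      (c :: t.1, t.2.1, t.2.2)
termination_by cs.length + ps.length

-- _with_gaps: one pass over the merged positions, consuming the row and the
-- (increasing) gap list; first arg counts the remaining merged positions
def wgAux : Nat → Nat → List Char → List Nat → List Char
  | 0, _, s, _ => s                       -- ''.join(res) + s[r:]
  | n + 1, m, s, g :: gs =>
    if g = m then '-' :: wgAux n (m + 1) s gs
    else
      match s with
      | ch :: s' => ch :: wgAux n (m + 1) s' (g :: gs)
      | [] => wgAux n (m + 1) [] (g :: gs)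
  | n + 1, m, s, [] =>
    match s with
    | ch :: s' => ch :: wgAux n (m + 1) s' []
    | [] => wgAux n (m + 1) [] []

def star_align_alt (msl : List String) (psa_seq_c : String) (psa_seq : String) : List String :=
  match msl with
  | [] => []
  | m0 :: rest =>
    let t := bWalk m0.toList psa_seq_c.toList 0
    String.mk t.1 ::
      (rest.map (fun r => String.mk (wgAux t.1.length 0 r.toList t.2.1)) ++
        [String.mk (wgAux t.1.length 0 psa_seq.toList t.2.2)])

-- ===== PRECONDITION & SPEC =====

-- number of non-gap characters of a row
def nonGapCount : List Char → Nat
  | [] => 0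
  | c :: s => if c = '-' then nonGapCount s else nonGapCount s + 1

-- number of trailing '-' characters of a row
def trailGapCount : List Char → Nat
  | [] => 0
  | c :: s => if c = '-' ∧ trailGapCount s = s.length then s.length + 1 else trailGapCount s

-- Pre_ excludes exactly the inputs on which A raises IndexError: msl empty, or the
-- gap-pattern merge exhausts psa_seq_c before the center row is consumed, which happens
-- iff the center has more non-gap characters than psa_seq_c, or equally many but more
-- trailing gaps.
def Pre_star_align (msl : List String) (psa_seq_c : String) (psa_seq : String) : Prop :=
  msl ≠ [] ∧
    (nonGapCount (msl.headD "").toList < nonGapCount psa_seq_c.toList ∨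
      (nonGapCount (msl.headD "").toList = nonGapCount psa_seq_c.toList ∧
        trailGapCount (msl.headD "").toList ≤ trailGapCount psa_seq_c.toList))

instance (msl : List String) (psa_seq_c : String) (psa_seq : String) :
    Decidable (Pre_star_align msl psa_seq_c psa_seq) := by
  unfold Pre_star_align; infer_instance

def pvWitness_star_align : List String × String × String := (["A-C", "GTC"], "-AC", "GGC")

def Spec_star_align (msl : List String) (psa_seq_c : String) (psa_seq : String) (out : List String) : Prop := out = star_align_alt msl psa_seq_c psa_seq
instance (msl : List String) (psa_seq_c : String) (psa_seq : String) (out : List String) : Decidable (Spec_star_align msl psa_seq_c psa_seq out) := by unfold Spec_star_align; infer_instance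

-- ===== CLAIM (what is proved, stated in full; the proofs are below) =====
def Claim_equal_star_align : Prop := ∀ (msl : List String) (psa_seq_c : String) (psa_seq : String), Dom_star_align msl psa_seq_c psa_seq → Pre_star_align msl psa_seq_c psa_seq → Spec_star_align msl psa_seq_c psa_seq (star_align msl psa_seq_c psa_seq)

-- ===== LEMMAS AND PROOFS =====

-- success predicate of the walk (proof-side only)
def okW : List Char → List Char → Prop
  | [], _ => True
  | _ :: _, [] => False
  | c :: cs', pch :: ps' =>
    if pch ≠ '-' ∧ c = '-' then okW cs' (pch :: ps')
    else if pch = '-' ∧ c ≠ '-' then okW (c :: cs') ps'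
    else okW cs' ps'
termination_by cs ps => cs.length + ps.length

lemma trail_le (s : List Char) : trailGapCount s ≤ s.length := by
  induction s with
  | nil => simp [trailGapCount]
  | cons c s ih => simp only [trailGapCount, List.length_cons]; split <;> omega

lemma trail_eq_len_iff (s : List Char) : trailGapCount s = s.length ↔ nonGapCount s = 0 := by
  induction s with
  | nil => simp [trailGapCount, nonGapCount]
  | cons c s ih =>
    simp only [trailGapCount, nonGapCount, List.length_cons]
    by_cases hc : c = '-' <;> by_cases ht : trailGapCount s = s.length <;>
      simp [hc, ht, ih.symm] <;> (try omega) <;>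
      exact fun h => absurd h (by have := trail_le s; omega)

lemma okW_cons (c pch : Char) (cs' ps' : List Char) :
    okW (c :: cs') (pch :: ps') =
      (if pch ≠ '-' ∧ c = '-' then okW cs' (pch :: ps')
       else if pch = '-' ∧ c ≠ '-' then okW (c :: cs') ps'
       else okW cs' ps') := by
  simp [okW]

lemma pre_imp_okW : ∀ cs ps : List Char,
    (nonGapCount cs < nonGapCount ps ∨
      (nonGapCount cs = nonGapCount ps ∧ trailGapCount cs ≤ trailGapCount ps)) →
    okW cs ps := by
  intro cs ps
  induction cs, ps using okW.induct with
  | case1 ps => intro _; simp [okW]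
  | case2 c cs' =>
    intro h
    exfalso
    rcases h with h | ⟨h1, h2⟩
    · simp [nonGapCount] at h
    · have h1' : nonGapCount (c :: cs') = 0 := by simpa [nonGapCount] using h1
      have hT : trailGapCount (c :: cs') = (c :: cs').length := (trail_eq_len_iff _).mpr h1'
      have h2' : trailGapCount (c :: cs') ≤ 0 := by simpa [trailGapCount] using h2
      simp [List.length_cons] at hT
      omega
  | case3 c cs' pch ps' hb ih =>
    intro h
    rw [okW_cons, if_pos hb]
    apply ih
    obtain ⟨hp, hc⟩ := hb
    subst hc
    have hl := trail_le cs'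
    by_cases ht1 : trailGapCount cs' = cs'.length
    · have a1 : nonGapCount cs' = 0 := (trail_eq_len_iff cs').mp ht1
      simp only [nonGapCount, trailGapCount, if_pos rfl, hp, ht1, if_neg hp,
        and_true, and_false, if_true, if_false, reduceIte] at h ⊢
      simp only [a1] at h ⊢
      omega
    · have a1 : nonGapCount cs' ≠ 0 := fun hh => ht1 ((trail_eq_len_iff cs').mpr hh)
      simp only [nonGapCount, trailGapCount, hp, ht1, and_true, and_false,
        if_true, if_false, reduceIte] at h ⊢
      omega
  | case4 c cs' pch ps' hb1 hb2 ih =>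
    intro h
    rw [okW_cons, if_neg hb1, if_pos hb2]
    apply ih
    obtain ⟨hp, hc⟩ := hb2
    subst hp
    have hl := trail_le ps'
    by_cases ht2 : trailGapCount ps' = ps'.length
    · have a2 : nonGapCount ps' = 0 := (trail_eq_len_iff ps').mp ht2
      simp only [nonGapCount, trailGapCount, hc, ht2, and_true, and_false,
        if_true, if_false, reduceIte] at h ⊢
      simp only [a2] at h ⊢
      omega
    · have a2 : nonGapCount ps' ≠ 0 := fun hh => ht2 ((trail_eq_len_iff ps').mpr hh)
      simp only [nonGapCount, trailGapCount, hc, ht2, and_true, and_false,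
        if_true, if_false, reduceIte] at h ⊢
      omega
  | case5 c cs' pch ps' hb1 hb2 ih =>
    intro h
    rw [okW_cons, if_neg hb1, if_neg hb2]
    apply ih
    have hl1 := trail_le cs'
    have hl2 := trail_le ps'
    by_cases hc : c = '-' <;> by_cases hp : pch = '-'
    · -- both gaps
      subst hc; subst hp
      by_cases ht1 : trailGapCount cs' = cs'.length <;>
        by_cases ht2 : trailGapCount ps' = ps'.length
      all_goals
        first
        | (have a1 : nonGapCount cs' = 0 := (trail_eq_len_iff cs').mp ht1
           have a2 : nonGapCount ps' = 0 := (trail_eq_len_iff ps').mp ht2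
           simp only [nonGapCount, trailGapCount, ht1, ht2, and_true, and_false,
             if_true, if_false, reduceIte] at h ⊢
           omega)
        | skip
      -- remaining mixed cases
      all_goals
        (try have a1 : nonGapCount cs' = 0 := (trail_eq_len_iff cs').mp (by assumption))
      · have a2 : nonGapCount ps' ≠ 0 := fun hh => ht2 ((trail_eq_len_iff ps').mpr hh)
        simp only [nonGapCount, trailGapCount, ht1, ht2, and_true, and_false,
          if_true, if_false, reduceIte] at h ⊢
        omega
      · have a1 : nonGapCount cs' ≠ 0 := fun hh => ht1 ((trail_eq_len_iff cs').mpr hh)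
        have a2 : nonGapCount ps' = 0 := (trail_eq_len_iff ps').mp ht2
        simp only [nonGapCount, trailGapCount, ht1, ht2, and_true, and_false,
          if_true, if_false, reduceIte] at h ⊢
        omega
      · have a1 : nonGapCount cs' ≠ 0 := fun hh => ht1 ((trail_eq_len_iff cs').mpr hh)
        have a2 : nonGapCount ps' ≠ 0 := fun hh => ht2 ((trail_eq_len_iff ps').mpr hh)
        simp only [nonGapCount, trailGapCount, ht1, ht2, and_true, and_false,
          if_true, if_false, reduceIte] at h ⊢
        omega
    · exact absurd ⟨hp, hc⟩ hb1
    · exact absurd ⟨hp, hc⟩ hb2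
    · -- both non-gaps
      simp only [nonGapCount, trailGapCount, if_neg hc, if_neg hp,
        false_and, and_false, if_false, reduceIte,
        (show ¬(c = '-' ∧ trailGapCount cs' = cs'.length) from fun hh => hc hh.1),
        (show ¬(pch = '-' ∧ trailGapCount ps' = ps'.length) from fun hh => hp hh.1)] at h ⊢
      omega

-- increasing gap lists within [lo, hi)
def IncB (lo hi : Nat) : List Nat → Prop
  | [] => True
  | g :: gs => lo ≤ g ∧ g < hi ∧ IncB (g + 1) hi gs

lemma IncB_mono {lo hi lo' hi' : Nat} {gs : List Nat} (h1 : lo' ≤ lo) (h2 : hi ≤ hi')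
    (h : IncB lo hi gs) : IncB lo' hi' gs := by
  induction gs generalizing lo lo' with
  | nil => trivial
  | cons g gs ih =>
    obtain ⟨a, b, c⟩ := h
    exact ⟨by omega, by omega, ih (le_refl _) c⟩

lemma IncB_ge_aux : ∀ (gs : List Nat) (lo hi : Nat), IncB lo hi gs → ∀ g ∈ gs, lo ≤ g := by
  intro gs
  induction gs with
  | nil => intro lo hi _ g hg; cases hg
  | cons g' gs ih =>
    intro lo hi h g hg
    obtain ⟨a, b, c⟩ := h
    cases hg with
    | head => exact a
    | tail _ hm => have := ih (g' + 1) hi c g hm; omega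

lemma IncB_ge {lo hi : Nat} {gs : List Nat} (h : IncB lo hi gs) : ∀ g ∈ gs, lo ≤ g :=
  IncB_ge_aux gs lo hi h

-- branch-wise equation lemmas for bWalk
lemma bWalk_b1 {c pch : Char} {cs ps : List Char} {m : Nat} (h : pch ≠ '-' ∧ c = '-') :
    bWalk (c :: cs) (pch :: ps) m =
      ('-' :: (bWalk cs (pch :: ps) (m + 1)).1,
        (bWalk cs (pch :: ps) (m + 1)).2.1,
        m :: (bWalk cs (pch :: ps) (m + 1)).2.2) := by
  simp only [bWalk]; rw [if_pos h]

lemma bWalk_b2 {c pch : Char} {cs ps : List Char} {m : Nat}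
    (h1 : ¬(pch ≠ '-' ∧ c = '-')) (h2 : pch = '-' ∧ c ≠ '-') :
    bWalk (c :: cs) (pch :: ps) m =
      ('-' :: (bWalk (c :: cs) ps (m + 1)).1,
        m :: (bWalk (c :: cs) ps (m + 1)).2.1,
        (bWalk (c :: cs) ps (m + 1)).2.2) := by
  simp only [bWalk]; rw [if_neg h1, if_pos h2]

lemma bWalk_b3 {c pch : Char} {cs ps : List Char} {m : Nat}
    (h1 : ¬(pch ≠ '-' ∧ c = '-')) (h2 : ¬(pch = '-' ∧ c ≠ '-')) :
    bWalk (c :: cs) (pch :: ps) m =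
      (c :: (bWalk cs ps (m + 1)).1,
        (bWalk cs ps (m + 1)).2.1,
        (bWalk cs ps (m + 1)).2.2) := by
  simp only [bWalk]; rw [if_neg h1, if_neg h2]

lemma bWalk_props : ∀ (cs ps : List Char) (m : Nat),
    IncB m (m + (bWalk cs ps m).1.length) (bWalk cs ps m).2.1 ∧
    IncB m (m + (bWalk cs ps m).1.length) (bWalk cs ps m).2.2 := by
  intro cs ps m
  induction cs, ps, m using bWalk.induct with
  | case1 m ps => simp [bWalk, IncB]
  | case2 m c cs' => simp [bWalk, IncB]
  | case3 m c cs' pch ps' hb ih =>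
    obtain ⟨ih1, ih2⟩ := ih
    rw [bWalk_b1 hb]
    simp only [List.length_cons]
    constructor
    · exact IncB_mono (Nat.le_succ m) (by omega) ih1
    · exact ⟨le_refl m, by omega, IncB_mono (le_refl _) (by omega) ih2⟩
  | case4 m c cs' pch ps' hb1 hb2 ih =>
    obtain ⟨ih1, ih2⟩ := ih
    rw [bWalk_b2 hb1 hb2]
    simp only [List.length_cons]
    constructor
    · exact ⟨le_refl m, by omega, IncB_mono (le_refl _) (by omega) ih1⟩
    · exact IncB_mono (Nat.le_succ m) (by omega) ih2
  | case5 m c cs' pch ps' hb1 hb2 ih =>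
    obtain ⟨ih1, ih2⟩ := ih
    rw [bWalk_b3 hb1 hb2]
    simp only [List.length_cons]
    exact ⟨IncB_mono (Nat.le_succ m) (by omega) ih1,
           IncB_mono (Nat.le_succ m) (by omega) ih2⟩

lemma insertGap_cons (ch : Char) (s : List Char) (k : Nat) (h : 1 ≤ k) :
    insertGap (ch :: s) k = ch :: insertGap s (k - 1) := by
  obtain ⟨j, rfl⟩ : ∃ j, k = j + 1 := ⟨k - 1, by omega⟩
  simp [insertGap]

lemma fold_insert_cons : ∀ (gs : List Nat) (m : Nat) (ch : Char) (s : List Char),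
    (∀ g ∈ gs, m + 1 ≤ g) →
    gs.foldl (fun t g => insertGap t (g - m)) (ch :: s) =
      ch :: gs.foldl (fun t g => insertGap t (g - (m + 1))) s := by
  intro gs
  induction gs with
  | nil => intro m ch s _; rfl
  | cons g gs ih =>
    intro m ch s h
    have hg : m + 1 ≤ g := h g (by simp)
    simp only [List.foldl_cons]
    rw [insertGap_cons ch s (g - m) (by omega)]
    have : g - m - 1 = g - (m + 1) := by omega
    rw [this]
    exact ih m ch _ (fun g' hg' => h g' (by simp [hg']))

lemma insertGap_replicate (k j : Nat) :
    insertGap (List.replicate k '-') j = List.replicate (k + 1) '-' := by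
  apply List.eq_replicate_iff.mpr
  constructor
  · simp [insertGap, List.length_take, List.length_drop]; omega
  · intro b hb
    simp only [insertGap, List.mem_append, List.mem_cons] at hb
    rcases hb with hb | hb | hb
    · exact List.eq_of_mem_replicate (List.mem_of_mem_take hb)
    · exact hb
    · exact List.eq_of_mem_replicate (List.mem_of_mem_drop hb)

lemma fold_insert_allgap : ∀ (gs : List Nat) (f : Nat → Nat) (k : Nat),
    gs.foldl (fun t g => insertGap t (f g)) (List.replicate k '-') =
      List.replicate (k + gs.length) '-' := by
  intro gs
  induction gs with
  | nil => intro f k; rfl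
  | cons g gs ih =>
    intro f k
    simp only [List.foldl_cons, insertGap_replicate]
    rw [ih]
    congr 1
    simp; omega

lemma wgAux_gap (n m : Nat) (s : List Char) (gs : List Nat) :
    wgAux (n + 1) m s (m :: gs) = '-' :: wgAux n (m + 1) s gs := by
  simp [wgAux]

lemma wgAux_cons (n m : Nat) (ch : Char) (s : List Char) (g : Nat) (gs : List Nat)
    (h : g ≠ m) : wgAux (n + 1) m (ch :: s) (g :: gs) = ch :: wgAux n (m + 1) s (g :: gs) := by
  simp [wgAux, h]

lemma wgAux_nil (n m : Nat) (g : Nat) (gs : List Nat) (h : g ≠ m) :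
    wgAux (n + 1) m [] (g :: gs) = wgAux n (m + 1) [] (g :: gs) := by
  simp [wgAux, h]

lemma wgAux_nogap_cons (n m : Nat) (ch : Char) (s : List Char) :
    wgAux (n + 1) m (ch :: s) [] = ch :: wgAux n (m + 1) s [] := by
  simp [wgAux]

lemma wgAux_nogap_nil (n m : Nat) : wgAux (n + 1) m [] [] = wgAux n (m + 1) [] [] := by
  simp [wgAux]

lemma wg_fold : ∀ (n m : Nat) (s : List Char) (gs : List Nat),
    IncB m (m + n) gs →
    wgAux n m s gs = gs.foldl (fun t g => insertGap t (g - m)) s := by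
  intro n
  induction n with
  | zero =>
    intro m s gs h
    cases gs with
    | nil => rfl
    | cons g gs => obtain ⟨a, b, _⟩ := h; omega
  | succ n ih =>
    intro m s gs h
    cases gs with
    | nil =>
      cases s with
      | nil => simpa [wgAux_nogap_nil] using ih (m + 1) [] [] trivial
      | cons ch s' =>
        rw [wgAux_nogap_cons, ih (m + 1) s' [] trivial]
        rfl
    | cons g gs' =>
      obtain ⟨hlo, hhi, hrest⟩ := h
      by_cases hg : g = m
      · subst hg
        rw [wgAux_gap, ih (g + 1) s gs' (IncB_mono (le_refl _) (by omega) hrest)]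
        have h1 : ∀ g' ∈ gs', g + 1 ≤ g' := IncB_ge hrest
        simp only [List.foldl_cons, Nat.sub_self]
        have hins : insertGap s 0 = '-' :: s := by simp [insertGap]
        rw [hins, fold_insert_cons gs' g '-' s h1]
      · have hgm : m + 1 ≤ g := by omega
        cases s with
        | cons ch s' =>
          rw [wgAux_cons n m ch s' g gs' hg,
            ih (m + 1) s' (g :: gs')
              ⟨hgm, by omega, IncB_mono (le_refl _) (by omega) hrest⟩,
            ← fold_insert_cons (g :: gs') m ch s'
              (by intro g' hg'
                  cases hg' with
                  | head => exact hgm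
                  | tail _ hm => have := IncB_ge hrest g' hm; omega)]
        | nil =>
          rw [wgAux_nil n m g gs' hg,
            ih (m + 1) [] (g :: gs')
              ⟨hgm, by omega, IncB_mono (le_refl _) (by omega) hrest⟩]
          have e0 : ([] : List Char) = List.replicate 0 '-' := rfl
          rw [e0, fold_insert_allgap, fold_insert_allgap]

lemma getElem?_append_len {α : Type} (done xs : List α) :
    (done ++ xs)[done.length]? = xs[0]? := by
  rw [List.getElem?_append_right (le_refl _)]
  simp

lemma insertGap_append (done xs : List Char) :
    insertGap (done ++ xs) done.length = done ++ '-' :: xs := by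
  simp [insertGap, List.take_left, List.drop_left]

lemma starLoopA_step (fuel : Nat) (center pc p : List Char) (rest : List (List Char))
    (i num : Nat) (pch cch : Char) (hnum : num ≠ 0)
    (h1 : pc[i]? = some pch) (h2 : center[i]? = some cch) :
    starLoopA (fuel + 1) center pc p rest i num =
      if pch ≠ '-' ∧ cch = '-' then
        starLoopA fuel center (insertGap pc i) (insertGap p i) rest (i + 1) (num - 1)
      else if pch = '-' ∧ cch ≠ '-' then
        starLoopA fuel (insertGap center i) pc p (rest.map (fun r => insertGap r i)) i (num + 1)
      else starLoopA fuel center pc p rest (i + 1) (num - 1) := by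
  simp [starLoopA, hnum, h1, h2]

lemma simul : ∀ (cs ps : List Char) (m : Nat),
    okW cs ps →
    ∀ (fuel : Nat) (done pcdone p : List Char) (rest : List (List Char)),
    2 * (cs.length + ps.length) < fuel → done.length = m → pcdone.length = m →
    starLoopA fuel (done ++ cs) (pcdone ++ ps) p rest m cs.length =
      ((done ++ (bWalk cs ps m).1) ::
        rest.map (fun r => (bWalk cs ps m).2.1.foldl (fun t g => insertGap t g) r)) ++
        [(bWalk cs ps m).2.2.foldl (fun t g => insertGap t g) p] := by
  intro cs ps m
  induction cs, ps, m using bWalk.induct with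
  | case1 m ps =>
    intro _ fuel done pcdone p rest hfuel hd hpc
    obtain ⟨f, rfl⟩ : ∃ f, fuel = f + 1 := ⟨fuel - 1, by omega⟩
    simp [starLoopA, bWalk]
  | case2 m c cs' =>
    intro hok; exact absurd hok (by simp [okW])
  | case3 m c cs' pch ps' hb ih =>
    intro hok fuel done pcdone p rest hfuel hd hpc
    obtain ⟨hp, hc⟩ := hb
    obtain ⟨f, rfl⟩ : ∃ f, fuel = f + 1 := ⟨fuel - 1, by omega⟩
    have hok' : okW cs' (pch :: ps') := by
      rw [okW_cons, if_pos ⟨hp, hc⟩] at hok; exact hok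
    subst hd
    have e1 : (pcdone ++ pch :: ps')[done.length]? = some pch := by
      rw [← hpc, getElem?_append_len]; rfl
    have e2 : (done ++ c :: cs')[done.length]? = some c := by
      rw [getElem?_append_len]; rfl
    rw [starLoopA_step f _ _ p rest done.length (c :: cs').length pch c (by simp) e1 e2,
      if_pos ⟨hp, hc⟩]
    have hins1 : insertGap (pcdone ++ pch :: ps') done.length =
        (pcdone ++ ['-']) ++ pch :: ps' := by
      rw [← hpc, insertGap_append]; simp
    have hins2 : done ++ c :: cs' = (done ++ [c]) ++ cs' := by simp
    have hlen : (c :: cs').length - 1 = cs'.length := by simp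
    rw [hins1, hins2, hlen]
    rw [ih hok' f (done ++ [c]) (pcdone ++ ['-']) (insertGap p done.length) rest
      (by simp at hfuel ⊢; omega) (by simp) (by simp [hpc])]
    rw [bWalk_b1 ⟨hp, hc⟩]
    subst hc
    simp [List.foldl_cons, List.append_assoc]
  | case4 m c cs' pch ps' hb1 hb2 ih =>
    intro hok fuel done pcdone p rest hfuel hd hpc
    obtain ⟨hp, hc⟩ := hb2
    obtain ⟨f, rfl⟩ : ∃ f, fuel = f + 1 := ⟨fuel - 1, by omega⟩
    obtain ⟨f', rfl⟩ : ∃ f', f = f' + 1 := ⟨f - 1, by simp at hfuel; omega⟩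
    have hok' : okW (c :: cs') ps' := by
      rw [okW_cons, if_neg hb1, if_pos ⟨hp, hc⟩] at hok; exact hok
    subst hd
    have e1 : (pcdone ++ pch :: ps')[done.length]? = some pch := by
      rw [← hpc, getElem?_append_len]; rfl
    have e2 : (done ++ c :: cs')[done.length]? = some c := by
      rw [getElem?_append_len]; rfl
    -- first iteration: branch 2 inserts a gap into the center and every other row
    rw [starLoopA_step (f' + 1) _ _ p rest done.length (c :: cs').length pch c (by simp) e1 e2,
      if_neg hb1, if_pos ⟨hp, hc⟩, insertGap_append]
    -- second iteration: the else-branch consumes the fresh '-' facing psa_seq_c's '-'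
    have e4 : (done ++ '-' :: c :: cs')[done.length]? = some '-' := by
      rw [getElem?_append_len]; rfl
    rw [starLoopA_step f' _ _ p _ done.length ((c :: cs').length + 1) pch '-'
        (by simp) e1 e4,
      if_neg (fun hh => hh.1 hp), if_neg (fun hh => hh.2 rfl)]
    have hins2 : done ++ '-' :: c :: cs' = (done ++ ['-']) ++ c :: cs' := by simp
    have hins3 : pcdone ++ pch :: ps' = (pcdone ++ [pch]) ++ ps' := by simp
    have hlen : (c :: cs').length + 1 - 1 = (c :: cs').length := by simp
    rw [hins2, hins3, hlen]
    rw [ih hok' f' (done ++ ['-']) (pcdone ++ [pch]) p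
      (rest.map (fun r => insertGap r done.length))
      (by simp at hfuel ⊢; omega) (by simp) (by simp [hpc])]
    rw [bWalk_b2 hb1 ⟨hp, hc⟩]
    simp [List.foldl_cons, List.append_assoc, List.map_map]
  | case5 m c cs' pch ps' hb1 hb2 ih =>
    intro hok fuel done pcdone p rest hfuel hd hpc
    obtain ⟨f, rfl⟩ : ∃ f, fuel = f + 1 := ⟨fuel - 1, by omega⟩
    have hok' : okW cs' ps' := by
      rw [okW_cons, if_neg hb1, if_neg hb2] at hok; exact hok
    subst hd
    have e1 : (pcdone ++ pch :: ps')[done.length]? = some pch := by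
      rw [← hpc, getElem?_append_len]; rfl
    have e2 : (done ++ c :: cs')[done.length]? = some c := by
      rw [getElem?_append_len]; rfl
    rw [starLoopA_step f _ _ p rest done.length (c :: cs').length pch c (by simp) e1 e2,
      if_neg hb1, if_neg hb2]
    have hins2 : done ++ c :: cs' = (done ++ [c]) ++ cs' := by simp
    have hins3 : pcdone ++ pch :: ps' = (pcdone ++ [pch]) ++ ps' := by simp
    have hlen : (c :: cs').length - 1 = cs'.length := by simp
    rw [hins2, hins3, hlen]
    rw [ih hok' f (done ++ [c]) (pcdone ++ [pch]) p rest
      (by simp at hfuel ⊢; omega) (by simp) (by simp [hpc])]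
    rw [bWalk_b3 hb1 hb2]
    simp [List.append_assoc]

-- ===== VERDICT (by name: the statement is the Claim_ definition above) =====
theorem star_align_spec : Claim_equal_star_align := by
  intro msl psa_seq_c psa_seq _hdom hpre
  obtain ⟨hne, hcond⟩ := hpre
  obtain ⟨m0, rest, rfl⟩ : ∃ m0 rest, msl = m0 :: rest := by
    cases msl with
    | nil => exact absurd rfl hne
    | cons a b => exact ⟨a, b, rfl⟩
  have hok : okW m0.toList psa_seq_c.toList := by
    apply pre_imp_okW
    simpa using hcond
  unfold Spec_star_align
  simp only [star_align, star_align_alt]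
  have hs := simul m0.toList psa_seq_c.toList 0 hok
    (2 * (m0.toList.length + psa_seq_c.toList.length) + 1)
    [] [] psa_seq.toList (rest.map String.toList) (by omega) rfl rfl
  simp only [List.nil_append] at hs
  rw [hs]
  obtain ⟨hg1, hg2⟩ := bWalk_props m0.toList psa_seq_c.toList 0
  have w1 : ∀ s : List Char,
      wgAux (bWalk m0.toList psa_seq_c.toList 0).1.length 0 s
        (bWalk m0.toList psa_seq_c.toList 0).2.1 =
      (bWalk m0.toList psa_seq_c.toList 0).2.1.foldl (fun t g => insertGap t g) s := by
    intro s
    rw [wg_fold _ 0 s _ (by simpa using hg1)]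
    simp
  have w2 : ∀ s : List Char,
      wgAux (bWalk m0.toList psa_seq_c.toList 0).1.length 0 s
        (bWalk m0.toList psa_seq_c.toList 0).2.2 =
      (bWalk m0.toList psa_seq_c.toList 0).2.2.foldl (fun t g => insertGap t g) s := by
    intro s
    rw [wg_fold _ 0 s _ (by simpa using hg2)]
    simp
  simp [w1, w2, List.map_map]
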